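-- pv_equiv track=rewrite | github.com/ftakanashi/JobProjects | LeetCode/1102.得分最高的路径/main.py | maximumMinimumPath
-- ===== SOURCE A (Python) =====
-- from typing import List
--
-- class UnionFind:
--     def __init__(self):
--         self.fa = {}
--         self.rank = {}
--
--     def find(self, x):
--         if x not in self.fa:
--             self.fa[x] = x
--             self.rank[x] = 0
--         elif self.fa[x] != x:
--             self.fa[x] = self.find(self.fa[x])
--         return self.fa[x]
--
--     def union(self, x, y):
--         rx, ry = self.find(x), self.find(y)
--         if rx == ry: return
--         if self.rank[rx] < self.rank[ry]:
--             self.fa[rx] = ry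
--         else:
--             self.fa[ry] = rx
--             if self.rank[rx] == self.rank[ry]: self.rank[rx] += 1
--
-- def maximumMinimumPath(grid: List[List[int]]) -> int:
--     m, n = len(grid), len(grid[0])
--     points = []
--     for i in range(m):
--         for j in range(n):
--             points.append((grid[i][j], i, j))
--     points.sort()    # 升序排序，后面直接从末尾pop，就可以获得倒序序列了
--
--     # 后续遍历不涉及起点和终点本身，所以这里ans与seen的初始化都要考虑这两者
--     seen = set()
--     ans = min(grid[0][0], grid[m-1][n-1])
--     seen.add((0, 0))
--     seen.add((m - 1, n - 1))
--     uf = UnionFind()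
--
--     direc = [(0,1), (0,-1), (1,0), (-1,0)]
--     while uf.find((0, 0)) != uf.find((m-1, n-1)):
--         v, x, y = points.pop()
--         ans = min(ans, v)
--         seen.add((x, y))
--         for a, b in direc:
--             nx, ny = x+a, y+b
--             if (nx, ny) in seen:
--                 uf.union((x, y), (nx, ny))
--     return ans
-- ===== SOURCE B (Python) =====
-- def maximumMinimumPath(grid):
--     # Same score (max over paths of the minimum cell), computed by descending-value
--     # sweep over a flat canonical-label partition (one-lookup representatives,
--     # relabel-on-merge) instead of a recursive union-find with path compression.
--     m, n = len(grid), len(grid[0])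
--     points = []
--     for i in range(m):
--         for j in range(n):
--             points.append((grid[i][j], i, j))
--     points.sort()
--
--     label = {}  # cell -> canonical cell of its class; absent = singleton
--
--     def rep(c):
--         return label.get(c, c)
--
--     def merge(a, b):
--         nonlocal label
--         la, lb = rep(a), rep(b)
--         if la != lb:
--             label = {k: (la if v == lb else v) for k, v in label.items()}
--             label[lb] = la
--
--     seen = {(0, 0), (m - 1, n - 1)}
--     ans = min(grid[0][0], grid[m - 1][n - 1])
--     while rep((0, 0)) != rep((m - 1, n - 1)):
--         v, x, y = points.pop()
--         ans = min(ans, v)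
--         seen.add((x, y))
--         for dx, dy in ((0, 1), (0, -1), (1, 0), (-1, 0)):
--             if (x + dx, y + dy) in seen:
--                 merge((x, y), (x + dx, y + dy))
--     return ans
-- ===== Notes on version B (the rewrite author's own statement) =====
-- stated objective: alternative
-- what changed: Replaced the recursive path-compressing, rank-based union-find with a flat canonical-label partition (no tree structure): each cell maps to its class representative with a single dictionary lookup, and a merge rewrites the absorbed class's label instead of re-rooting trees; each merge costs a full scan, trading speed for the flat structure.
import Mathlib
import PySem

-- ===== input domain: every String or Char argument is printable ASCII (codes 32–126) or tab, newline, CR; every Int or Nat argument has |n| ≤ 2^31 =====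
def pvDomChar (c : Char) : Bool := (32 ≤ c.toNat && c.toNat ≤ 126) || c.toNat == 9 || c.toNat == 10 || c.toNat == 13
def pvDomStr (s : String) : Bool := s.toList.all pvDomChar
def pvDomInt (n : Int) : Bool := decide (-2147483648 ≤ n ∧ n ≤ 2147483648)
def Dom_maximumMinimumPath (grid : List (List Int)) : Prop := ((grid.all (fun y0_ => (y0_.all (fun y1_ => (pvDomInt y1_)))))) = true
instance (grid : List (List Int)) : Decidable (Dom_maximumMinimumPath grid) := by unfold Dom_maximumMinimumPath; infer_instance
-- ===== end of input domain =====

-- B replaces A's recursive path-compressing, rank-keeping union-find by a flat canonical-label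
-- partition (one-lookup representative, relabel-on-merge); same return value, no speed claim.

-- ===== PORT A =====
-- cells are Python (int, int) tuples; points are (value, i, j) triples

-- UnionFind.find with explicit state threading (fa, rank) and fuel fa.size+1
-- (always sufficient: parent chains visit distinct keys); recursion, insertion
-- and path-compression writes follow the Python line by line.
def pvFindA : Nat → PySem.Dict (Int × Int) (Int × Int) → PySem.Dict (Int × Int) Int → (Int × Int) →
    PySem.Dict (Int × Int) (Int × Int) × PySem.Dict (Int × Int) Int × (Int × Int)
  | 0, fa, rk, x => (fa, rk, x)
  | fuel+1, fa, rk, x =>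
    match fa.get? x with
    | none => (fa.insert x x, rk.insert x 0, x)
    | some p =>
      if p = x then (fa, rk, x)
      else
        let r := pvFindA fuel fa rk p
        (r.1.insert x r.2.2, r.2.1, r.2.2)

-- UnionFind.union; rank lookups use getD 0 (the keys are always present after find)
def pvUnionA (fa : PySem.Dict (Int × Int) (Int × Int)) (rk : PySem.Dict (Int × Int) Int)
    (x y : Int × Int) : PySem.Dict (Int × Int) (Int × Int) × PySem.Dict (Int × Int) Int :=
  let f1 := pvFindA (fa.size + 1) fa rk x
  let f2 := pvFindA (f1.1.size + 1) f1.1 f1.2.1 y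
  let rx := f1.2.2
  let ry := f2.2.2
  if rx = ry then (f2.1, f2.2.1)
  else if f2.2.1.getD rx 0 < f2.2.1.getD ry 0 then (f2.1.insert rx ry, f2.2.1)
  else
    (f2.1.insert ry rx,
     if f2.2.1.getD rx 0 = f2.2.1.getD ry 0 then f2.2.1.insert rx (f2.2.1.getD rx 0 + 1) else f2.2.1)

def pvDirec : List (Int × Int) := [(0, 1), (0, -1), (1, 0), (-1, 0)]

-- the while loop; points are kept reversed so Python's points.pop() is the head
def pvLoopA (s t : Int × Int) : List (Int × Int × Int) → PySem.Dict (Int × Int) (Int × Int) →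
    PySem.Dict (Int × Int) Int → PySem.Set (Int × Int) → Int → Int
  | rpoints, fa, rk, seen, ans =>
    let f1 := pvFindA (fa.size + 1) fa rk s
    let f2 := pvFindA (f1.1.size + 1) f1.1 f1.2.1 t
    if f1.2.2 = f2.2.2 then ans
    else
      match rpoints with
      | [] => ans  -- Python raises IndexError here; never reached on inputs satisfying Pre_
      | (v, x, y) :: rest =>
        let ans' := min ans v
        let seen' := seen.add (x, y)
        let st := pvDirec.foldl (fun st d =>
            if seen'.contains (x + d.1, y + d.2) then pvUnionA st.1 st.2 (x, y) (x + d.1, y + d.2)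
            else st) (f2.1, f2.2.1)
        pvLoopA s t rest st.1 st.2 seen' ans'

-- the points list, built and sorted as in Python; the tie-break key i*n+j equals
-- lexicographic (i, j) for the generated 0 ≤ j < n, i.e. Python's tuple sort order
def pvPoints (grid : List (List Int)) (m n : Int) : List (Int × Int × Int) :=
  PySem.List.sorted2
    ((PySem.List.pyRange 0 m 1).flatMap (fun i =>
      (PySem.List.pyRange 0 n 1).map (fun j =>
        (PySem.List.pyGetD (PySem.List.pyGetD grid i []) j 0, i, j))))
    (fun p => p.1) (fun p => p.2.1 * n + p.2.2)

def maximumMinimumPath (grid : List (List Int)) : Int :=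
  let m : Int := grid.length
  let row0 : List Int := (PySem.List.pyGet? grid 0).getD []
  let n : Int := row0.length
  let ans := min (PySem.List.pyGetD row0 0 0)
                 (PySem.List.pyGetD (PySem.List.pyGetD grid (m - 1) []) (n - 1) 0)
  let seen := PySem.Set.add (PySem.Set.add PySem.Set.empty ((0 : Int), (0 : Int))) (m - 1, n - 1)
  pvLoopA (0, 0) (m - 1, n - 1) (pvPoints grid m n).reverse PySem.Dict.empty PySem.Dict.empty seen ans

-- ===== PORT B =====
-- rep: one dictionary lookup, no chain following
def pvRep (label : PySem.Dict (Int × Int) (Int × Int)) (c : Int × Int) : Int × Int :=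
  label.getD c c

-- merge: rewrite every value lb to la (the dict comprehension) and repoint lb
def pvMerge (label : PySem.Dict (Int × Int) (Int × Int)) (a b : Int × Int) :
    PySem.Dict (Int × Int) (Int × Int) :=
  let la := pvRep label a
  let lb := pvRep label b
  if la = lb then label
  else (PySem.Dict.mk (label.items.map (fun kv => (kv.1, if kv.2 = lb then la else kv.2)))).insert lb la

def pvLoopB (s t : Int × Int) : List (Int × Int × Int) → PySem.Dict (Int × Int) (Int × Int) →
    PySem.Set (Int × Int) → Int → Int
  | rpoints, label, seen, ans =>
    if pvRep label s = pvRep label t then ans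
    else
      match rpoints with
      | [] => ans
      | (v, x, y) :: rest =>
        let ans' := min ans v
        let seen' := seen.add (x, y)
        let label' := pvDirec.foldl (fun lab d =>
            if seen'.contains (x + d.1, y + d.2) then pvMerge lab (x, y) (x + d.1, y + d.2)
            else lab) label
        pvLoopB s t rest label' seen' ans'

def maximumMinimumPath_alt (grid : List (List Int)) : Int :=
  let m : Int := grid.length
  let row0 : List Int := (PySem.List.pyGet? grid 0).getD []
  let n : Int := row0.length
  let ans := min (PySem.List.pyGetD row0 0 0)
                 (PySem.List.pyGetD (PySem.List.pyGetD grid (m - 1) []) (n - 1) 0)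
  let seen := PySem.Set.add (PySem.Set.add PySem.Set.empty ((0 : Int), (0 : Int))) (m - 1, n - 1)
  pvLoopB (0, 0) (m - 1, n - 1) (pvPoints grid m n).reverse PySem.Dict.empty seen ans

-- ===== PRECONDITION & SPEC =====
-- Pre_ excludes exactly the inputs where Python A raises: the empty grid and grids
-- with a row shorter than row 0 (IndexError while building points / reading corners).
def Pre_maximumMinimumPath (grid : List (List Int)) : Prop :=
  grid ≠ [] ∧ grid.headI ≠ [] ∧ ∀ row ∈ grid, grid.headI.length ≤ row.length
instance (grid : List (List Int)) : Decidable (Pre_maximumMinimumPath grid) := by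
  unfold Pre_maximumMinimumPath; infer_instance

def pvWitness_maximumMinimumPath : List (List Int) := [[5, 4, 5], [1, 2, 6], [7, 4, 6]]

def Spec_maximumMinimumPath (grid : List (List Int)) (out : Int) : Prop := out = maximumMinimumPath_alt grid
instance (grid : List (List Int)) (out : Int) : Decidable (Spec_maximumMinimumPath grid out) := by unfold Spec_maximumMinimumPath; infer_instance

-- ===== CLAIM (what is proved, stated in full; the proofs are below) =====
def Claim_equal_maximumMinimumPath : Prop := ∀ (grid : List (List Int)), Dom_maximumMinimumPath grid → Pre_maximumMinimumPath grid → Spec_maximumMinimumPath grid (maximumMinimumPath grid)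

-- ===== LEMMAS AND PROOFS =====
-- ---- abbreviations used only by the proofs ----
abbrev PvFa := PySem.Dict (Int × Int) (Int × Int)

def pvStep (fa : PvFa) (z : Int × Int) : Int × Int :=
  match fa.get? z with
  | none => z
  | some p => if p = z then z else p

def pvIsRoot (fa : PvFa) (r : Int × Int) : Prop :=
  fa.get? r = none ∨ fa.get? r = some r

def pvRootsTo (fa : PvFa) (z r : Int × Int) : Prop :=
  ∃ f : Nat, (pvStep fa)^[f] z = r ∧ pvIsRoot fa r

def pvInv (fa : PvFa) : Prop := ∀ z, ∃ r, pvRootsTo fa z r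

def pvREq (fa : PvFa) (a b : Int × Int) : Prop :=
  ∃ r, pvRootsTo fa a r ∧ pvRootsTo fa b r

def pvCanL (label : PvFa) : Prop :=
  ∀ k v, label.get? k = some v → pvRep label v = v

def pvCoup (fa label : PvFa) : Prop :=
  pvInv fa ∧ pvCanL label ∧ ∀ a b, (pvREq fa a b ↔ pvRep label a = pvRep label b)

-- ---- basic facts about chains ----
theorem pvStep_fix {fa : PvFa} {r : Int × Int} (h : pvIsRoot fa r) : pvStep fa r = r := by
  cases h with
  | inl h => simp [pvStep, h]
  | inr h => simp [pvStep, h]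

theorem pvIter_fix {fa : PvFa} {r : Int × Int} (h : pvIsRoot fa r) (f : Nat) :
    (pvStep fa)^[f] r = r :=
  Function.iterate_fixed (pvStep_fix h) f

theorem pvIter_stable {fa : PvFa} {z r : Int × Int} {f : Nat}
    (h : (pvStep fa)^[f] z = r) (hr : pvIsRoot fa r) {g : Nat} (hg : f ≤ g) :
    (pvStep fa)^[g] z = r := by
  have : g = (g - f) + f := by omega
  rw [this, Function.iterate_add_apply, h, pvIter_fix hr]

theorem pvRootsTo_unique {fa : PvFa} {z r r' : Int × Int}
    (h1 : pvRootsTo fa z r) (h2 : pvRootsTo fa z r') : r = r' := by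
  obtain ⟨f, hf, hr⟩ := h1
  obtain ⟨g, hg, hr'⟩ := h2
  rcases le_total f g with h | h
  · rw [← pvIter_stable hf hr h, hg]
  · rw [← pvIter_stable hg hr' h, hf]

theorem pvRootsTo_of_isRoot {fa : PvFa} {r : Int × Int} (h : pvIsRoot fa r) :
    pvRootsTo fa r r := ⟨0, rfl, h⟩

theorem pvStep_edge {fa : PvFa} {z p : Int × Int} (h : fa.get? z = some p) (hne : p ≠ z) :
    pvStep fa z = p := by simp [pvStep, h, hne]

theorem pvRootsTo_cons {fa : PvFa} {z p r : Int × Int} (h : fa.get? z = some p) (hne : p ≠ z)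
    (hp : pvRootsTo fa p r) : pvRootsTo fa z r := by
  obtain ⟨f, hf, hr⟩ := hp
  exact ⟨f + 1, by rw [Function.iterate_succ_apply, pvStep_edge h hne, hf], hr⟩

theorem pvREq_symm {fa : PvFa} {a b : Int × Int} (h : pvREq fa a b) : pvREq fa b a := by
  obtain ⟨r, h1, h2⟩ := h; exact ⟨r, h2, h1⟩

theorem pvREq_trans {fa : PvFa} {a b c : Int × Int} (h1 : pvREq fa a b) (h2 : pvREq fa b c) :
    pvREq fa a c := by
  obtain ⟨r, ha, hb⟩ := h1
  obtain ⟨r', hb', hc⟩ := h2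
  exact ⟨r, ha, (pvRootsTo_unique hb' hb) ▸ hc⟩

-- roots of a dict after inserting are transferred outside the inserted key
theorem pvIsRoot_insert_iff {fa : PvFa} {x0 v0 r : Int × Int} (h : r ≠ x0) :
    pvIsRoot (fa.insert x0 v0) r ↔ pvIsRoot fa r := by
  unfold pvIsRoot
  rw [PySem.Dict.get?_insert_of_ne fa v0 h]

theorem pvNotRoot_insert {fa : PvFa} {x0 v0 : Int × Int} (hne : x0 ≠ v0) :
    ¬ pvIsRoot (fa.insert x0 v0) x0 := by
  intro h
  rcases h with h | h <;> rw [PySem.Dict.get?_insert_self] at h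
  · simp at h
  · exact hne (Option.some.inj h).symm
-- ---- effect of one parent-pointer insert on reachable roots ----
theorem pvRedirect_fwd {fa : PvFa} {x0 v0 rold : Int × Int}
    (hv : pvIsRoot fa v0) (hne : x0 ≠ v0) (hold : pvRootsTo fa x0 rold)
    (hcase : v0 = rold ∨ rold = x0) :
    ∀ f z, pvIsRoot (fa.insert x0 v0) ((pvStep (fa.insert x0 v0))^[f] z) →
      ∃ r1, pvRootsTo fa z r1 ∧
        (pvStep (fa.insert x0 v0))^[f] z = if r1 = rold then v0 else r1 := by
  intro f
  induction f with
  | zero =>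
    intro z hz
    simp only [Function.iterate_zero, id_eq] at hz ⊢
    have hzx : z ≠ x0 := by rintro rfl; exact pvNotRoot_insert hne hz
    have hz' : pvIsRoot fa z := (pvIsRoot_insert_iff hzx).mp hz
    refine ⟨z, pvRootsTo_of_isRoot hz', ?_⟩
    by_cases h : z = rold
    · rcases hcase with rfl | rfl
      · rw [if_pos h, h]
      · exact absurd h hzx
    · rw [if_neg h]
  | succ f ih =>
    intro z hz
    rw [Function.iterate_succ_apply] at hz ⊢
    rcases hg : (fa.insert x0 v0).get? z with _ | p
    · have hfix : pvStep (fa.insert x0 v0) z = z := pvStep_fix (Or.inl hg)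
      rw [hfix] at hz ⊢
      exact ih z hz
    · by_cases hpz : p = z
      · rw [hpz] at hg
        have hfix : pvStep (fa.insert x0 v0) z = z := pvStep_fix (Or.inr hg)
        rw [hfix] at hz ⊢
        exact ih z hz
      · have hstep : pvStep (fa.insert x0 v0) z = p := pvStep_edge hg hpz
        rw [hstep] at hz ⊢
        obtain ⟨r1, hr1, heq⟩ := ih p hz
        by_cases hzx : z = x0
        · have hpv : p = v0 := by
            have h := PySem.Dict.get?_insert_self fa x0 v0
            rw [hzx, h] at hg
            exact (Option.some.inj hg).symm
          have hr1v : r1 = v0 := by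
            rw [hpv] at hr1
            exact pvRootsTo_unique hr1 (pvRootsTo_of_isRoot hv)
          refine ⟨rold, by rw [hzx]; exact hold, ?_⟩
          rw [if_pos rfl, heq, hr1v]
          by_cases h : v0 = rold
          · rw [if_pos h]
          · rw [if_neg h]
        · have hgz : fa.get? z = some p := by
            rw [← PySem.Dict.get?_insert_of_ne fa v0 hzx]; exact hg
          exact ⟨r1, pvRootsTo_cons hgz hpz hr1, heq⟩

theorem pvRedirect_bwd {fa : PvFa} {x0 v0 rold : Int × Int}
    (hv : pvIsRoot fa v0) (hne : x0 ≠ v0) (hold : pvRootsTo fa x0 rold)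
    (hcase : v0 = rold ∨ rold = x0) :
    ∀ f z, pvIsRoot fa ((pvStep fa)^[f] z) →
      pvRootsTo (fa.insert x0 v0) z
        (if (pvStep fa)^[f] z = rold then v0 else (pvStep fa)^[f] z) := by
  have hvx : v0 ≠ x0 := Ne.symm hne
  have hvroot' : pvIsRoot (fa.insert x0 v0) v0 := (pvIsRoot_insert_iff hvx).mpr hv
  have hx0v : pvRootsTo (fa.insert x0 v0) x0 v0 :=
    pvRootsTo_cons (PySem.Dict.get?_insert_self fa x0 v0) hvx (pvRootsTo_of_isRoot hvroot')
  intro f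
  induction f with
  | zero =>
    intro z hz
    simp only [Function.iterate_zero, id_eq] at hz ⊢
    by_cases hzx : z = x0
    · have hzz : pvRootsTo fa z rold := by rw [hzx]; exact hold
      have hro : rold = z := pvRootsTo_unique hzz (pvRootsTo_of_isRoot hz)
      rw [if_pos hro.symm, hzx]
      exact hx0v
    · have hz' : pvIsRoot (fa.insert x0 v0) z := (pvIsRoot_insert_iff hzx).mpr hz
      by_cases h : z = rold
      · cases hcase with
        | inl hc =>
          have hzv : z = v0 := by rw [h, ← hc]
          rw [if_pos h, hzv]
          exact pvRootsTo_of_isRoot hvroot'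
        | inr hc => exact absurd (h.trans hc) hzx
      · rw [if_neg h]; exact pvRootsTo_of_isRoot hz'
  | succ f ih =>
    intro z hz
    rw [Function.iterate_succ_apply] at hz ⊢
    rcases hg : fa.get? z with _ | p
    · have hfix : pvStep fa z = z := pvStep_fix (Or.inl hg)
      rw [hfix] at hz ⊢
      exact ih z hz
    · by_cases hpz : p = z
      · rw [hpz] at hg
        have hfix : pvStep fa z = z := pvStep_fix (Or.inr hg)
        rw [hfix] at hz ⊢
        exact ih z hz
      · have hstep : pvStep fa z = p := pvStep_edge hg hpz
        rw [hstep] at hz ⊢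
        by_cases hzx : z = x0
        · have h1 : pvRootsTo fa x0 ((pvStep fa)^[f] p) :=
            ⟨f + 1, by rw [Function.iterate_succ_apply, ← hzx, hstep], hz⟩
          have h2 : (pvStep fa)^[f] p = rold := pvRootsTo_unique h1 hold
          rw [h2, if_pos rfl, hzx]
          exact hx0v
        · have hgz' : (fa.insert x0 v0).get? z = some p := by
            rw [PySem.Dict.get?_insert_of_ne fa v0 hzx]; exact hg
          exact pvRootsTo_cons hgz' hpz (ih p hz)

theorem pvRedirect {fa : PvFa} {x0 v0 rold : Int × Int}
    (hv : pvIsRoot fa v0) (hne : x0 ≠ v0) (hold : pvRootsTo fa x0 rold)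
    (hcase : v0 = rold ∨ rold = x0) (z r0 : Int × Int) :
    pvRootsTo (fa.insert x0 v0) z r0 ↔
      ∃ r1, pvRootsTo fa z r1 ∧ r0 = if r1 = rold then v0 else r1 := by
  constructor
  · rintro ⟨f, hf, hr⟩
    obtain ⟨r1, h1, h2⟩ := pvRedirect_fwd hv hne hold hcase f z (by rw [hf]; exact hr)
    exact ⟨r1, h1, by rw [← hf, h2]⟩
  · rintro ⟨r1, ⟨f, hf, hr⟩, rfl⟩
    have h := pvRedirect_bwd hv hne hold hcase f z (by rw [hf]; exact hr)
    rwa [hf] at h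
-- ---- fuel bound: in an invariant dict every chain reaches a root within size steps ----
theorem pvReach_size {fa : PvFa} (hInv : pvInv fa) (z : Int × Int) :
    pvIsRoot fa ((pvStep fa)^[fa.size] z) := by
  obtain ⟨r, f0, hf0, hr⟩ := hInv z
  have hex : ∃ f, pvIsRoot fa ((pvStep fa)^[f] z) := ⟨f0, by rw [hf0]; exact hr⟩
  letI : DecidablePred fun f => pvIsRoot fa ((pvStep fa)^[f] z) := fun f => by
    unfold pvIsRoot; infer_instance
  have hroot : pvIsRoot fa ((pvStep fa)^[Nat.find hex] z) := Nat.find_spec hex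
  have hmin : ∀ k < Nat.find hex, ¬ pvIsRoot fa ((pvStep fa)^[k] z) := fun k hk =>
    Nat.find_min hex hk
  rcases Nat.lt_or_ge fa.size (Nat.find hex) with hlt | hle
  swap
  · rw [pvIter_stable rfl hroot hle]; exact hroot
  · exfalso
    have hinj : ∀ i j, i < j → j < Nat.find hex →
        (pvStep fa)^[i] z ≠ (pvStep fa)^[j] z := by
      intro i j hij hj heq
      have hper : (pvStep fa)^[Nat.find hex] z = (pvStep fa)^[Nat.find hex - (j - i)] z := by
        have h1 : Nat.find hex = (Nat.find hex - j) + j := by omega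
        calc (pvStep fa)^[Nat.find hex] z
            = (pvStep fa)^[(Nat.find hex - j) + j] z := by rw [← h1]
          _ = (pvStep fa)^[Nat.find hex - j] ((pvStep fa)^[j] z) :=
              Function.iterate_add_apply _ _ _ _
          _ = (pvStep fa)^[Nat.find hex - j] ((pvStep fa)^[i] z) := by rw [← heq]
          _ = (pvStep fa)^[(Nat.find hex - j) + i] z :=
              (Function.iterate_add_apply _ _ _ _).symm
          _ = (pvStep fa)^[Nat.find hex - (j - i)] z := by congr 1; omega
      exact hmin (Nat.find hex - (j - i)) (by omega) (by rw [← hper]; exact hroot)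
    have hkey : ∀ i < Nat.find hex, (pvStep fa)^[i] z ∈ fa.items.map Prod.fst := by
      intro i hi
      rcases hg : fa.get? ((pvStep fa)^[i] z) with _ | p
      · exact absurd (Or.inl hg) (hmin i hi)
      · unfold PySem.Dict.get? at hg
        rcases hfind : fa.items.find? (fun q => q.1 == (pvStep fa)^[i] z) with _ | q
        · rw [hfind] at hg; simp at hg
        · have hmem := List.mem_of_find?_eq_some hfind
          have hk : q.1 = (pvStep fa)^[i] z := by
            have := List.find?_some hfind; simpa using this
          rw [← hk]
          exact List.mem_map_of_mem hmem
    have hcard : (Finset.range (Nat.find hex)).card ≤ (fa.items.map Prod.fst).toFinset.card := by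
      apply Finset.card_le_card_of_injOn (fun i => (pvStep fa)^[i] z)
      · intro i hi
        have hi' : i < Nat.find hex := by simpa using hi
        simp only [Finset.mem_coe, List.mem_toFinset]
        exact hkey i hi'
      · intro i hi j hj hij'
        have hi' : i < Nat.find hex := by simpa using hi
        have hj' : j < Nat.find hex := by simpa using hj
        by_contra hne'
        rcases lt_or_gt_of_ne hne' with h | h
        · exact hinj i j h hj' hij'
        · exact hinj j i h hi' hij'.symm
    have hlen : (fa.items.map Prod.fst).toFinset.card ≤ fa.size := by
      have := List.toFinset_card_le (fa.items.map Prod.fst)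
      simpa [PySem.Dict.size] using this
    rw [Finset.card_range] at hcard
    omega

theorem pvFindA_succ (f : Nat) (fa : PvFa) (rk : PySem.Dict (Int × Int) Int) (x : Int × Int) :
    pvFindA (f + 1) fa rk x =
      match fa.get? x with
      | none => (fa.insert x x, rk.insert x 0, x)
      | some p =>
        if p = x then (fa, rk, x)
        else
          let r := pvFindA f fa rk p
          (r.1.insert x r.2.2, r.2.1, r.2.2) := rfl

-- ---- find: returns the root and preserves every reachable root ----
theorem pvFind_core {fa : PvFa} : ∀ (f : Nat) (rk : PySem.Dict (Int × Int) Int) (x : Int × Int),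
    pvIsRoot fa ((pvStep fa)^[f] x) →
    (pvFindA (f + 1) fa rk x).2.2 = (pvStep fa)^[f] x ∧
    ∀ z r0, (pvRootsTo (pvFindA (f + 1) fa rk x).1 z r0 ↔ pvRootsTo fa z r0) := by
  have insSelf : ∀ (x : Int × Int), fa.get? x = none →
      ∀ z r0, (pvRootsTo (fa.insert x x) z r0 ↔ pvRootsTo fa z r0) := by
    intro x hg z r0
    have hstep : pvStep (fa.insert x x) = pvStep fa := by
      funext w
      by_cases hw : w = x
      · rw [hw]; simp [pvStep, PySem.Dict.get?_insert_self, hg]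
      · unfold pvStep; rw [PySem.Dict.get?_insert_of_ne fa x hw]
    have hroot : ∀ r, pvIsRoot (fa.insert x x) r ↔ pvIsRoot fa r := by
      intro r
      by_cases hr : r = x
      · rw [hr]
        constructor
        · intro _; exact Or.inl hg
        · intro _; exact Or.inr (PySem.Dict.get?_insert_self fa x x)
      · exact pvIsRoot_insert_iff hr
    unfold pvRootsTo
    rw [hstep]
    exact exists_congr fun f => and_congr_right fun _ => hroot r0
  intro f
  induction f with
  | zero =>
    intro rk x hx
    simp only [Function.iterate_zero, id_eq] at hx ⊢
    rcases hg : fa.get? x with _ | p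
    · rw [pvFindA_succ, hg]
      exact ⟨rfl, insSelf x hg⟩
    · by_cases hpx : p = x
      · rw [pvFindA_succ, hg]
        dsimp only
        rw [if_pos hpx]
        exact ⟨rfl, fun z r0 => Iff.rfl⟩
      · exfalso
        rcases hx with h | h
        · rw [hg] at h; simp at h
        · rw [hg] at h; exact hpx (Option.some.inj h)
  | succ f ih =>
    intro rk x hx
    rcases hg : fa.get? x with _ | p
    · have hroot : pvIsRoot fa x := Or.inl hg
      have hiter : (pvStep fa)^[f + 1] x = x := pvIter_fix hroot (f + 1)
      rw [hiter, pvFindA_succ, hg]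
      exact ⟨rfl, insSelf x hg⟩
    · by_cases hpx : p = x
      · rw [hpx] at hg
        have hroot : pvIsRoot fa x := Or.inr hg
        have hiter : (pvStep fa)^[f + 1] x = x := pvIter_fix hroot (f + 1)
        rw [hiter, pvFindA_succ, hg]
        dsimp only
        rw [if_pos rfl]
        exact ⟨rfl, fun z r0 => Iff.rfl⟩
      · have hstep : pvStep fa x = p := pvStep_edge hg hpx
        have hitereq : (pvStep fa)^[f + 1] x = (pvStep fa)^[f] p := by
          rw [Function.iterate_succ_apply, hstep]
        have hx' : pvIsRoot fa ((pvStep fa)^[f] p) := by rw [← hitereq]; exact hx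
        obtain ⟨hres, hpres⟩ := ih rk p hx'
        rw [pvFindA_succ, hg]
        dsimp only
        rw [if_neg hpx]
        have hrtroot : pvIsRoot fa ((pvStep fa)^[f] p) := hx'
        have hrtR : pvRootsTo (pvFindA (f + 1) fa rk p).1 ((pvStep fa)^[f] p) ((pvStep fa)^[f] p) :=
          (hpres _ _).mpr (pvRootsTo_of_isRoot hrtroot)
        obtain ⟨-, -, hvR⟩ := hrtR
        have hxrt : x ≠ (pvStep fa)^[f] p := by
          intro heq
          rw [← heq] at hrtroot
          rcases hrtroot with h | h
          · rw [hg] at h; simp at h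
          · rw [hg] at h; exact hpx (Option.some.inj h)
        have hRx : pvRootsTo (pvFindA (f + 1) fa rk p).1 x ((pvStep fa)^[f] p) :=
          (hpres _ _).mpr ⟨f + 1, hitereq, hrtroot⟩
        constructor
        · simp only [hitereq]
          exact hres
        · intro z r0
          have hred := pvRedirect (fa := (pvFindA (f + 1) fa rk p).1)
            (x0 := x) (v0 := (pvFindA (f + 1) fa rk p).2.2) (rold := (pvStep fa)^[f] p)
            (by rw [hres]; exact hvR) (by rw [hres]; exact hxrt) hRx (by rw [hres]; exact Or.inl rfl) z r0
          simp only [hres] at hred ⊢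
          rw [hred]
          constructor
          · rintro ⟨r1, h1, h2⟩
            have : r0 = r1 := by
              by_cases h : r1 = (pvStep fa)^[f] p
              · rw [h2, if_pos h, h]
              · rw [h2, if_neg h]
            rw [this]
            exact (hpres z r1).mp h1
          · intro h
            refine ⟨r0, (hpres z r0).mpr h, ?_⟩
            by_cases hh : r0 = (pvStep fa)^[f] p
            · rw [if_pos hh, hh]
            · rw [if_neg hh]

theorem pvFind_spec {fa : PvFa} (hInv : pvInv fa) (rk : PySem.Dict (Int × Int) Int)
    (x : Int × Int) :
    pvRootsTo fa x ((pvFindA (fa.size + 1) fa rk x).2.2) ∧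
    ∀ z r0, (pvRootsTo (pvFindA (fa.size + 1) fa rk x).1 z r0 ↔ pvRootsTo fa z r0) := by
  have h := pvReach_size hInv x
  obtain ⟨h1, h2⟩ := pvFind_core fa.size rk x h
  exact ⟨by rw [h1]; exact ⟨fa.size, rfl, h⟩, h2⟩

theorem pvInv_of_pres {fa fb : PvFa}
    (hpres : ∀ z r0, (pvRootsTo fb z r0 ↔ pvRootsTo fa z r0)) (hInv : pvInv fa) : pvInv fb :=
  fun z => (hInv z).imp fun r hr => (hpres z r).mpr hr
theorem pvREq_of_pres {d1 d2 : PvFa}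
    (hpres : ∀ z r0, (pvRootsTo d1 z r0 ↔ pvRootsTo d2 z r0)) (a b : Int × Int) :
    pvREq d1 a b ↔ pvREq d2 a b := by
  unfold pvREq
  exact exists_congr fun r => and_congr (hpres a r) (hpres b r)

theorem pvREq_iff_root {d : PvFa} {a c Ra Rc : Int × Int}
    (hRa : pvRootsTo d a Ra) (hRc : pvRootsTo d c Rc) : pvREq d a c ↔ Ra = Rc := by
  constructor
  · rintro ⟨r, h1, h2⟩
    rw [pvRootsTo_unique hRa h1, pvRootsTo_unique hRc h2]
  · intro h
    exact ⟨Ra, hRa, h ▸ hRc⟩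

-- linking two distinct roots merges exactly their two classes
theorem pvLink {d : PvFa} (hInv : pvInv d) {rx ry : Int × Int}
    (hrx : pvIsRoot d rx) (hry : pvIsRoot d ry) (hne : rx ≠ ry) :
    pvInv (d.insert ry rx) ∧
    ∀ a b, (pvREq (d.insert ry rx) a b ↔
      (pvREq d a b ∨ (pvREq d a rx ∧ pvREq d b ry) ∨ (pvREq d a ry ∧ pvREq d b rx))) := by
  have hred := pvRedirect (fa := d) (x0 := ry) (v0 := rx) (rold := ry)
    hrx (Ne.symm hne) (pvRootsTo_of_isRoot hry) (Or.inr rfl)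
  constructor
  · intro z
    obtain ⟨Rz, hRz⟩ := hInv z
    exact ⟨if Rz = ry then rx else Rz, (hred z _).mpr ⟨Rz, hRz, rfl⟩⟩
  · intro a b
    obtain ⟨Ra, hRa⟩ := hInv a
    obtain ⟨Rb, hRb⟩ := hInv b
    have hRa' : pvRootsTo (d.insert ry rx) a (if Ra = ry then rx else Ra) :=
      (hred a _).mpr ⟨Ra, hRa, rfl⟩
    have hRb' : pvRootsTo (d.insert ry rx) b (if Rb = ry then rx else Rb) :=
      (hred b _).mpr ⟨Rb, hRb, rfl⟩
    rw [pvREq_iff_root hRa' hRb', pvREq_iff_root hRa hRb,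
      pvREq_iff_root hRa (pvRootsTo_of_isRoot hrx),
      pvREq_iff_root hRb (pvRootsTo_of_isRoot hry),
      pvREq_iff_root hRa (pvRootsTo_of_isRoot hry),
      pvREq_iff_root hRb (pvRootsTo_of_isRoot hrx)]
    by_cases h1 : Ra = ry <;> by_cases h2 : Rb = ry <;>
      simp [h1, h2, Ne.symm hne]
    · constructor
      · intro h; tauto
      · rintro (h | ⟨h, h'⟩ | ⟨h, h'⟩) <;> tauto

theorem pvUnion_spec {fa : PvFa} (hInv : pvInv fa) (rk : PySem.Dict (Int × Int) Int)
    (x y : Int × Int) :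
    pvInv (pvUnionA fa rk x y).1 ∧
    ∀ a b, (pvREq (pvUnionA fa rk x y).1 a b ↔
      (pvREq fa a b ∨ (pvREq fa a x ∧ pvREq fa b y) ∨ (pvREq fa a y ∧ pvREq fa b x))) := by
  obtain ⟨hx1, hpres1⟩ := pvFind_spec hInv rk x
  have hInv1 : pvInv (pvFindA (fa.size + 1) fa rk x).1 := pvInv_of_pres hpres1 hInv
  obtain ⟨hy2, hpres2⟩ := pvFind_spec hInv1 (pvFindA (fa.size + 1) fa rk x).2.1 y
  set A1 := pvFindA (fa.size + 1) fa rk x with hA1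
  set A2 := pvFindA (A1.1.size + 1) A1.1 A1.2.1 y with hA2
  have hyfa : pvRootsTo fa y A2.2.2 := (hpres1 y _).mp hy2
  have hpres12 : ∀ z r0, (pvRootsTo A2.1 z r0 ↔ pvRootsTo fa z r0) := fun z r0 =>
    (hpres2 z r0).trans (hpres1 z r0)
  have hInv2 : pvInv A2.1 := pvInv_of_pres hpres12 hInv
  have hxrootfa : pvRootsTo fa x A1.2.2 := hx1
  obtain ⟨-, -, hrxroot⟩ := id hx1
  obtain ⟨-, -, hryroot⟩ := id hyfa
  have hrx2 : pvRootsTo A2.1 A1.2.2 A1.2.2 := (hpres12 _ _).mpr (pvRootsTo_of_isRoot hrxroot)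
  obtain ⟨-, -, hrx2root⟩ := id hrx2
  have hry2 : pvRootsTo A2.1 A2.2.2 A2.2.2 := (hpres12 _ _).mpr (pvRootsTo_of_isRoot hryroot)
  obtain ⟨-, -, hry2root⟩ := id hry2
  have hxs : ∀ a, pvREq fa a A1.2.2 ↔ pvREq fa a x := by
    intro a
    obtain ⟨Ra, hRa⟩ := hInv a
    rw [pvREq_iff_root hRa (pvRootsTo_of_isRoot hrxroot), pvREq_iff_root hRa hxrootfa]
  have hys : ∀ a, pvREq fa a A2.2.2 ↔ pvREq fa a y := by
    intro a
    obtain ⟨Ra, hRa⟩ := hInv a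
    rw [pvREq_iff_root hRa (pvRootsTo_of_isRoot hryroot), pvREq_iff_root hRa hyfa]
  have hbody : pvUnionA fa rk x y =
      (if A1.2.2 = A2.2.2 then (A2.1, A2.2.1)
       else if A2.2.1.getD A1.2.2 0 < A2.2.1.getD A2.2.2 0 then (A2.1.insert A1.2.2 A2.2.2, A2.2.1)
       else (A2.1.insert A2.2.2 A1.2.2,
         if A2.2.1.getD A1.2.2 0 = A2.2.1.getD A2.2.2 0 then
           A2.2.1.insert A1.2.2 (A2.2.1.getD A1.2.2 0 + 1)
         else A2.2.1)) := by
    rw [hA2, hA1]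
    rfl
  rw [hbody]
  split_ifs with h1 h2
  · refine ⟨hInv2, fun a b => ?_⟩
    rw [pvREq_of_pres hpres12]
    have hxy : pvREq fa x y := ⟨A1.2.2, hxrootfa, by rw [h1]; exact hyfa⟩
    constructor
    · exact Or.inl
    · rintro (h | ⟨ha, hb⟩ | ⟨ha, hb⟩)
      · exact h
      · exact pvREq_trans (pvREq_trans ha hxy) (pvREq_symm hb)
      · exact pvREq_trans (pvREq_trans ha (pvREq_symm hxy)) (pvREq_symm hb)
  · obtain ⟨hI, hR⟩ := pvLink hInv2 hry2root hrx2root (Ne.symm h1)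
    refine ⟨hI, fun a b => (hR a b).trans ?_⟩
    simp only [pvREq_of_pres hpres12, hxs, hys]
    tauto
  · obtain ⟨hI, hR⟩ := pvLink hInv2 hrx2root hry2root h1
    exact ⟨hI, fun a b => (hR a b).trans (by simp only [pvREq_of_pres hpres12, hxs, hys])⟩
  · obtain ⟨hI, hR⟩ := pvLink hInv2 hrx2root hry2root h1
    exact ⟨hI, fun a b => (hR a b).trans (by simp only [pvREq_of_pres hpres12, hxs, hys])⟩

-- ---- B side: the flat canonical-label partition ----
theorem pvGet_mapVal (label : PvFa) (g : Int × Int → Int × Int) (z : Int × Int) :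
    (PySem.Dict.mk (label.items.map (fun kv => (kv.1, g kv.2)))).get? z =
      (label.get? z).map g := by
  simp only [PySem.Dict.get?]
  rw [List.find?_map]
  have hpred : ((fun p : (Int × Int) × (Int × Int) => p.1 == z) ∘
      (fun kv : (Int × Int) × (Int × Int) => (kv.1, g kv.2))) = fun p => p.1 == z := rfl
  rw [hpred, Option.map_map, Option.map_map]
  rfl

theorem pvGet_mapVal' (label : PvFa) (la lb : Int × Int) (z : Int × Int) :
    (PySem.Dict.mk (label.items.map (fun kv =>
      (kv.1, if kv.2 = lb then la else kv.2)))).get? z =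
      (label.get? z).map (fun v => if v = lb then la else v) :=
  pvGet_mapVal label (fun v => if v = lb then la else v) z

theorem pvRep_of_get_some {d : PvFa} {w v : Int × Int} (h : d.get? w = some v) :
    pvRep d w = v := by
  unfold pvRep PySem.Dict.getD
  rw [h]
  rfl

theorem pvRep_of_get_none {d : PvFa} {w : Int × Int} (h : d.get? w = none) :
    pvRep d w = w := by
  unfold pvRep PySem.Dict.getD
  rw [h]
  rfl

theorem pvRep_idem {label : PvFa} (hC : pvCanL label) (c : Int × Int) :
    pvRep label (pvRep label c) = pvRep label c := by
  rcases hg : label.get? c with _ | v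
  · simp only [pvRep_of_get_none hg]
  · rw [pvRep_of_get_some hg]
    exact hC c v hg

theorem pvMerge_eq (label : PvFa) (a b : Int × Int) (hne : pvRep label a ≠ pvRep label b) :
    pvMerge label a b = (PySem.Dict.mk (label.items.map (fun kv =>
      (kv.1, if kv.2 = pvRep label b then pvRep label a else kv.2)))).insert
        (pvRep label b) (pvRep label a) := by
  unfold pvMerge
  rw [if_neg hne]

theorem pvRep_merge {label : PvFa} (hC : pvCanL label) (a b : Int × Int)
    (hne : pvRep label a ≠ pvRep label b) (z : Int × Int) :
    pvRep (pvMerge label a b) z =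
      if pvRep label z = pvRep label b then pvRep label a else pvRep label z := by
  rw [pvMerge_eq label a b hne]
  set M := PySem.Dict.mk (label.items.map (fun kv =>
    (kv.1, if kv.2 = pvRep label b then pvRep label a else kv.2))) with hM
  by_cases hz : z = pvRep label b
  · have h1 : pvRep (M.insert (pvRep label b) (pvRep label a)) z = pvRep label a :=
      pvRep_of_get_some (by rw [hz]; exact PySem.Dict.get?_insert_self _ _ _)
    rw [h1, if_pos (by rw [hz]; exact pvRep_idem hC b)]
  · have hgz : (M.insert (pvRep label b) (pvRep label a)).get? z =
        (label.get? z).map (fun v => if v = pvRep label b then pvRep label a else v) := by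
      rw [PySem.Dict.get?_insert_of_ne _ _ hz, hM]
      exact pvGet_mapVal' label (pvRep label a) (pvRep label b) z
    rcases hg0 : label.get? z with _ | v
    · rw [hg0] at hgz
      rw [pvRep_of_get_none hgz, pvRep_of_get_none hg0, if_neg hz]
    · rw [hg0] at hgz
      rw [pvRep_of_get_some hgz, pvRep_of_get_some hg0]

theorem pvCanL_merge {label : PvFa} (hC : pvCanL label) (a b : Int × Int) :
    pvCanL (pvMerge label a b) := by
  by_cases hne : pvRep label a = pvRep label b
  · unfold pvMerge
    rw [if_pos hne]
    exact hC
  · intro k v hkv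
    -- identify the possible values v of the merged dict
    have hval : v = pvRep label a ∨ (pvRep label v = v ∧ v ≠ pvRep label b) := by
      rw [pvMerge_eq label a b hne] at hkv
      by_cases hk : k = pvRep label b
      · rw [hk, PySem.Dict.get?_insert_self] at hkv
        exact Or.inl (Option.some.inj hkv).symm
      · rw [PySem.Dict.get?_insert_of_ne _ _ hk, pvGet_mapVal'] at hkv
        rcases hgk : label.get? k with _ | v0
        · rw [hgk] at hkv; simp at hkv
        · rw [hgk] at hkv
          have hv : v = if v0 = pvRep label b then pvRep label a else v0 :=
            (Option.some.inj hkv).symm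
          by_cases h0 : v0 = pvRep label b
          · rw [if_pos h0] at hv; exact Or.inl hv
          · rw [if_neg h0] at hv
            rw [hv]
            exact Or.inr ⟨hC k v0 hgk, h0⟩
    -- now evaluate rep of v in the merged dict
    rw [pvRep_merge hC a b hne v]
    rcases hval with hv | ⟨hrv, hvb⟩
    · rw [hv, pvRep_idem hC a, if_neg hne]
    · rw [hrv, if_neg hvb]

theorem pvMerge_rel {label : PvFa} (hC : pvCanL label) (a b z1 z2 : Int × Int) :
    (pvRep (pvMerge label a b) z1 = pvRep (pvMerge label a b) z2) ↔
      (pvRep label z1 = pvRep label z2 ∨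
        (pvRep label z1 = pvRep label a ∧ pvRep label z2 = pvRep label b) ∨
        (pvRep label z1 = pvRep label b ∧ pvRep label z2 = pvRep label a)) := by
  by_cases hne : pvRep label a = pvRep label b
  · unfold pvMerge
    rw [if_pos hne]
    constructor
    · exact Or.inl
    · rintro (h | ⟨h1, h2⟩ | ⟨h1, h2⟩)
      · exact h
      · rw [h1, h2, hne]
      · rw [h1, h2, hne]
  · rw [pvRep_merge hC a b hne z1, pvRep_merge hC a b hne z2]
    by_cases e1 : pvRep label z1 = pvRep label b <;>
      by_cases e2 : pvRep label z2 = pvRep label b <;>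
        simp [e1, e2] <;> tauto
theorem pvCoup_step {fa label : PvFa} (h : pvCoup fa label)
    (rk : PySem.Dict (Int × Int) Int) (c d : Int × Int) :
    pvCoup (pvUnionA fa rk c d).1 (pvMerge label c d) := by
  obtain ⟨hInv, hC, hIff⟩ := h
  obtain ⟨hI, hR⟩ := pvUnion_spec hInv rk c d
  refine ⟨hI, pvCanL_merge hC c d, fun a b => ?_⟩
  rw [hR a b, pvMerge_rel hC c d a b]
  simp only [hIff]

theorem pvFold_coup (x y : Int) (seen : PySem.Set (Int × Int)) :
    ∀ (ds : List (Int × Int)) (st : PvFa × PySem.Dict (Int × Int) Int) (label : PvFa),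
      pvCoup st.1 label →
      pvCoup ((ds.foldl (fun st d =>
          if seen.contains (x + d.1, y + d.2) then pvUnionA st.1 st.2 (x, y) (x + d.1, y + d.2)
          else st) st)).1
        (ds.foldl (fun lab d =>
          if seen.contains (x + d.1, y + d.2) then pvMerge lab (x, y) (x + d.1, y + d.2)
          else lab) label) := by
  intro ds
  induction ds with
  | nil => intro st label h; exact h
  | cons d ds ih =>
    intro st label h
    simp only [List.foldl_cons]
    by_cases hc : seen.contains (x + d.1, y + d.2) = true
    · rw [if_pos hc, if_pos hc]
      exact ih _ _ (pvCoup_step h st.2 _ _)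
    · rw [if_neg hc, if_neg hc]
      exact ih _ _ h

theorem pvLoop_eq (s t : Int × Int) :
    ∀ (rpoints : List (Int × Int × Int)) (fa : PvFa) (rk : PySem.Dict (Int × Int) Int)
      (label : PvFa) (seen : PySem.Set (Int × Int)) (ans : Int), pvCoup fa label →
      pvLoopA s t rpoints fa rk seen ans = pvLoopB s t rpoints label seen ans := by
  intro rpoints
  induction rpoints with
  | nil =>
    intro fa rk label seen ans h
    rw [pvLoopA, pvLoopB]
    split_ifs <;> rfl
  | cons hd tl ih =>
    intro fa rk label seen ans h
    obtain ⟨hInv, hC, hIff⟩ := h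
    rw [pvLoopA, pvLoopB]
    obtain ⟨hs1, hpres1⟩ := pvFind_spec hInv rk s
    have hInv1 : pvInv (pvFindA (fa.size + 1) fa rk s).1 := pvInv_of_pres hpres1 hInv
    obtain ⟨ht2, hpres2⟩ := pvFind_spec hInv1 (pvFindA (fa.size + 1) fa rk s).2.1 t
    set F1 := pvFindA (fa.size + 1) fa rk s with hF1
    set F2 := pvFindA (F1.1.size + 1) F1.1 F1.2.1 t with hF2
    have htfa : pvRootsTo fa t F2.2.2 := (hpres1 t _).mp ht2
    have hpres12 : ∀ z r0, (pvRootsTo F2.1 z r0 ↔ pvRootsTo fa z r0) := fun z r0 =>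
      (hpres2 z r0).trans (hpres1 z r0)
    have hcond : (F1.2.2 = F2.2.2) ↔ (pvRep label s = pvRep label t) :=
      ((pvREq_iff_root hs1 htfa).symm.trans (hIff s t))
    have hcoup2 : pvCoup F2.1 label :=
      ⟨pvInv_of_pres hpres12 hInv, hC, fun a b =>
        (pvREq_of_pres hpres12 a b).trans (hIff a b)⟩
    by_cases hc : pvRep label s = pvRep label t
    · rw [if_pos (hcond.mpr hc), if_pos hc]
    · rw [if_neg (fun hh => hc (hcond.mp hh)), if_neg hc]
      obtain ⟨v, x, y⟩ := hd
      dsimp only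
      exact ih _ _ _ _ _ (pvFold_coup x y (seen.add (x, y)) pvDirec (F2.1, F2.2.1) label hcoup2)

theorem pvCoup_empty : pvCoup PySem.Dict.empty PySem.Dict.empty := by
  have hget : ∀ z : Int × Int, (PySem.Dict.empty : PvFa).get? z = none := fun z => rfl
  have hroot : ∀ z : Int × Int, pvIsRoot PySem.Dict.empty z := fun z => Or.inl (hget z)
  refine ⟨fun z => ⟨z, pvRootsTo_of_isRoot (hroot z)⟩, ?_, ?_⟩
  · intro k v hkv
    rw [hget k] at hkv
    simp at hkv
  · intro a b
    have hrep : ∀ z : Int × Int, pvRep (PySem.Dict.empty : PvFa) z = z := fun z =>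
      pvRep_of_get_none (hget z)
    rw [hrep a, hrep b,
      pvREq_iff_root (pvRootsTo_of_isRoot (hroot a)) (pvRootsTo_of_isRoot (hroot b))]

-- ===== VERDICT (by name: the statement is the Claim_ definition above) =====
theorem maximumMinimumPath_spec : Claim_equal_maximumMinimumPath := by
  intro grid _ _
  unfold Spec_maximumMinimumPath maximumMinimumPath maximumMinimumPath_alt
  exact pvLoop_eq _ _ _ _ _ _ _ _ pvCoup_empty
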